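-- pv_equiv track=rewrite | github.com/KatrinKroin/DES-3Loop-Attack | src/DES_Attack.py | ReverseS4
-- ===== SOURCE A (Python) =====
-- def ReverseS4(bits):
--     s=[[7, 13, 14, 3, 0, 6, 9, 10, 1, 2, 8, 5, 11, 12, 4, 15],
--          [13, 8, 11, 5, 6, 15, 0, 3, 4, 7, 2, 12, 1, 10, 14, 9],
--          [10, 6, 9, 0, 12, 11, 7, 13, 15, 1, 3, 14, 5, 2, 8, 4],
--          [3, 15, 0, 6, 10, 1, 13, 8, 9, 4, 5, 11, 12, 7, 2, 14]]
--
--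
--
--     key=[]
--     i=0
--     while i<6:
--         key+='x'
--         i+=1
--     if 'x' in bits:
--         return key
--     num=int(bits,2)
--
--     options=[]
--     k=0
--     q=0
--     for i in s:
--         for j in i:
--             if j==num:
--                 row=(bin(k)[2:].zfill(2))
--                 colomn=(bin(q)[2:].zfill(4))
--                 temp=''
--                 temp=[row[0]+colomn[0:4]+row[1]]
--                 options+=temp
--             q+=1
--         k+=1
--         q=0
--
--     i=0
--     while i<6 :
--         if options[0][i]==options[1][i] and options[0][i]==options[2][i] and options[0][i]==options[3][i]:
--             key[i]=options[0][i]
--         i+=1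
--
--     return key
-- ===== SOURCE B (Python) =====
-- def ReverseS4(bits):
--     key = ['x'] * 6
--     if 'x' in bits:
--         return key
--     num = int(bits, 2)
--     s = [[7, 13, 14, 3, 0, 6, 9, 10, 1, 2, 8, 5, 11, 12, 4, 15],
--          [13, 8, 11, 5, 6, 15, 0, 3, 4, 7, 2, 12, 1, 10, 14, 9],
--          [10, 6, 9, 0, 12, 11, 7, 13, 15, 1, 3, 14, 5, 2, 8, 4],
--          [3, 15, 0, 6, 10, 1, 13, 8, 9, 4, 5, 11, 12, 7, 2, 14]]
--     cols = []
--     for row in s: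
--         for c, v in enumerate(row):
--             if v == num:
--                 cols.append(c)
--     c0 = cols[0]
--     c1 = cols[1]
--     c2 = cols[2]
--     c3 = cols[3]
--     for t in range(4):
--         m = 8 >> t
--         b = c0 & m
--         if (c1 & m) == b and (c2 & m) == b and (c3 & m) == b:
--             key[1 + t] = '1' if b else '0'
--     return key
-- ===== Notes on version B (the rewrite author's own statement) =====
-- stated objective: simpler
-- what changed: B finds the column index of num in each of the four S4 rows and compares the four indices bitwise with masks to set the agreed key bits, instead of A's building four binary option strings (row bits around column bits) and comparing them character by character at all six positions; the two row-bit positions can never agree so B leaves them unknown.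
import Mathlib
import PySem

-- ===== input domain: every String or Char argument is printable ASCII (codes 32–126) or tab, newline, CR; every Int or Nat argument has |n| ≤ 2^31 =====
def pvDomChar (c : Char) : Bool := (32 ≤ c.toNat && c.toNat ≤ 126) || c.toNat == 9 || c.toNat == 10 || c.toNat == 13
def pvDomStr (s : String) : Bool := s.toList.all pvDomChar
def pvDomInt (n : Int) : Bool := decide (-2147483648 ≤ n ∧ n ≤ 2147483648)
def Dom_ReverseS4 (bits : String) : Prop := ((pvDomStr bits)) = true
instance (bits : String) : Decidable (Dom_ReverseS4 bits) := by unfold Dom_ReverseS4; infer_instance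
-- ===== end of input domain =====

-- B replaces A's four generated binary option strings and per-position character comparison by a
-- bitwise comparison (with masks) of the four column indices of num; objective: simpler.
-- Shared data: the S4 table, literally present in both Pythons.
def pvS4 : List (List Int) :=
  [[7, 13, 14, 3, 0, 6, 9, 10, 1, 2, 8, 5, 11, 12, 4, 15],
   [13, 8, 11, 5, 6, 15, 0, 3, 4, 7, 2, 12, 1, 10, 14, 9],
   [10, 6, 9, 0, 12, 11, 7, 13, 15, 1, 3, 14, 5, 2, 8, 4],
   [3, 15, 0, 6, 10, 1, 13, 8, 9, 4, 5, 11, 12, 7, 2, 14]]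

-- ===== PORT A =====
-- binary digits of a Nat, most significant first (empty for 0): the digits of Python's bin(n).
-- Structural recursion on a fuel bound (fuel = n + 1 always suffices since n halves each step).
def pvBinDigitsAux : Nat → Nat → List Char
  | 0, _ => []
  | fuel+1, n => if n = 0 then [] else pvBinDigitsAux fuel (n/2) ++ [if n % 2 = 1 then '1' else '0']

def pvBinDigits (n : Nat) : List Char := pvBinDigitsAux (n+1) n

-- bin(n)[2:].zfill(w); exact for 0 ≤ n (A only calls it with n in 0..15)
def pvBinZfill (n : Int) (w : Nat) : List Char :=
  let d := pvBinDigits n.toNat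
  let d := if d = [] then ['0'] else d
  List.replicate (w - d.length) '0' ++ d

-- the part of A after `num = int(bits, 2)`: the nested options loop, then the agreement loop
def ReverseS4Core (num : Int) (key0 : List String) : List String :=
  -- for i in s: for j in i: … (k = row counter, q = column counter, reset per row)
  let res := pvS4.foldl (fun (st : List String × Int) i =>
      let inner := i.foldl (fun (st2 : List String × Int) j =>
          if j = num then
            let row := pvBinZfill st.2 2
            let colomn := pvBinZfill st2.2 4
            -- row[0] + colomn[0:4] + row[1]: row always has length 2, so row[0] = take 1, row[1] = drop 1
            let temp := [String.ofList (row.take 1 ++ PySem.List.slice colomn (some 0) (some 4) ++ row.drop 1)]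
            (st2.1 ++ temp, st2.2 + 1)
          else (st2.1, st2.2 + 1)) (st.1, (0 : Int))
      (inner.1, st.2 + 1)) (([] : List String), (0 : Int))
  let options := res.1
  -- while i < 6: compare options[0][i], options[1][i], options[2][i], options[3][i]
  (List.range 6).foldl (fun (key : List String) (i : Nat) =>
    match PySem.List.pyGet? options 0, PySem.List.pyGet? options 1,
          PySem.List.pyGet? options 2, PySem.List.pyGet? options 3 with
    | some o0, some o1, some o2, some o3 =>
      match PySem.Str.pyGet? o0 (i : Int), PySem.Str.pyGet? o1 (i : Int),
            PySem.Str.pyGet? o2 (i : Int), PySem.Str.pyGet? o3 (i : Int) with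
      | some a0, some a1, some a2, some a3 =>
        if a0 = a1 ∧ a0 = a2 ∧ a0 = a3 then key.set i (String.ofList [a0]) else key
      | _, _, _, _ => key   -- IndexError in Python; excluded by Pre_
    | _, _, _, _ => key     -- IndexError in Python (options shorter than 4); excluded by Pre_
  ) key0

def ReverseS4 (bits : String) : List String :=
  -- key = []; while i < 6: key += 'x'
  let key := (List.range 6).foldl (fun k _ => k ++ ["x"]) ([] : List String)
  if bits.toList.contains 'x' then key
  else
    match PySem.Int.ofStrBase? bits 2 with
    | none => key        -- int(bits, 2) raises ValueError; excluded by Pre_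
    | some num => ReverseS4Core num key

-- ===== PORT B =====
-- the part of B after `num = int(bits, 2)`: one column index per row, then bitmask agreement
def ReverseS4AltCore (num : Int) (key0 : List String) : List String :=
  -- for row in s: for c, v in enumerate(row): if v == num: cols.append(c)
  let cols := pvS4.foldl (fun acc row =>
      (PySem.List.enumerate row).foldl
        (fun a cv => if cv.2 = num then a ++ [cv.1] else a) acc) ([] : List Int)
  match PySem.List.pyGet? cols 0, PySem.List.pyGet? cols 1,
        PySem.List.pyGet? cols 2, PySem.List.pyGet? cols 3 with
  | some c0, some c1, some c2, some c3 =>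
    (List.range 4).foldl (fun (key : List String) (t : Nat) =>
      let m : Int := ((8 >>> t : Nat) : Int)   -- m = 8 >> t
      let b := Int.land c0 m
      if Int.land c1 m = b ∧ Int.land c2 m = b ∧ Int.land c3 m = b then
        key.set (1 + t) (if b ≠ 0 then "1" else "0")
      else key) key0
  | _, _, _, _ => key0   -- cols[k] raises IndexError in Python (num not in the table); excluded by Pre_

def ReverseS4_alt (bits : String) : List String :=
  let key := List.replicate 6 "x"
  if bits.toList.contains 'x' then key
  else
    match PySem.Int.ofStrBase? bits 2 with
    | none => key        -- int(bits, 2) raises ValueError; excluded by Pre_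
    | some num => ReverseS4AltCore num key

-- ===== PRECONDITION & SPEC =====
-- Pre_: bits contains 'x' (early return), or int(bits, 2) parses to a value in 0..15; outside this
-- A raises (ValueError from int, or IndexError at options[0] when the value is not in the table).
def Pre_ReverseS4 (bits : String) : Prop :=
  'x' ∈ bits.toList ∨
    (0 ≤ (PySem.Int.ofStrBase? bits 2).getD (-1) ∧ (PySem.Int.ofStrBase? bits 2).getD (-1) < 16)
instance (bits : String) : Decidable (Pre_ReverseS4 bits) := by unfold Pre_ReverseS4; infer_instance

def pvWitness_ReverseS4 : String := "0110"

def Spec_ReverseS4 (bits : String) (out : List String) : Prop := out = ReverseS4_alt bits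
instance (bits : String) (out : List String) : Decidable (Spec_ReverseS4 bits out) := by unfold Spec_ReverseS4; infer_instance

-- ===== CLAIM (what is proved, stated in full; the proofs are below) =====
def Claim_equal_ReverseS4 : Prop := ∀ (bits : String), Dom_ReverseS4 bits → Pre_ReverseS4 bits → Spec_ReverseS4 bits (ReverseS4 bits)

-- ===== LEMMAS AND PROOFS =====
theorem pvCore_eq_all : ∀ n ∈ [(0:Int),1,2,3,4,5,6,7,8,9,10,11,12,13,14,15],
    ReverseS4Core n (List.replicate 6 "x") = ReverseS4AltCore n (List.replicate 6 "x") := by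
  decide

theorem pvCore_eq (n : Int) (h0 : 0 ≤ n) (h1 : n < 16) :
    ReverseS4Core n (List.replicate 6 "x") = ReverseS4AltCore n (List.replicate 6 "x") :=
  pvCore_eq_all n (by simp; omega)

-- ===== VERDICT (by name: the statement is the Claim_ definition above) =====
theorem ReverseS4_spec : Claim_equal_ReverseS4 := by
  intro bits _ hpre
  unfold Spec_ReverseS4 ReverseS4 ReverseS4_alt
  by_cases hx : 'x' ∈ bits.toList
  · simp [hx]
  · cases hopt : PySem.Int.ofStrBase? bits 2 with
    | none =>
      rcases hpre with hmem | ⟨hge, _⟩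
      · exact absurd hmem hx
      · rw [hopt] at hge; norm_num at hge
    | some n =>
      have hb : 0 ≤ n ∧ n < 16 := by
        rcases hpre with hmem | ⟨hge, hlt⟩
        · exact absurd hmem hx
        · rw [hopt] at hge hlt; simpa using ⟨hge, hlt⟩
      simp [hx]
      exact pvCore_eq n hb.1 hb.2
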